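-- pv_equiv track=rewrite | github.com/ihorivliev/Tests | EE6.py | is_weakly_connected
-- ===== SOURCE A (Python) =====
-- from collections import deque
--
-- nodes = list(range(4))
--
-- def is_weakly_connected(adj):
--     visited = {nodes[0]}
--     queue = deque([nodes[0]])
--     while queue:
--         u = queue.popleft()
--         for v in nodes:
--             if adj[u][v] or adj[v][u]:
--                 if v not in visited:
--                     visited.add(v)
--                     queue.append(v)
--     return len(visited) == len(nodes)
-- ===== SOURCE B (Python) =====
-- nodes = list(range(4))
--
-- def is_weakly_connected(adj):
--     parent = list(range(4))
--
--     def find(x):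
--         while parent[x] != x:
--             x = parent[x]
--         return x
--
--     for i in nodes:
--         for j in nodes:
--             if adj[i][j] or adj[j][i]:
--                 ri, rj = find(i), find(j)
--                 if ri != rj:
--                     parent[ri] = rj
--     return len({find(i) for i in nodes}) == 1
-- ===== Notes on version B (the rewrite author's own statement) =====
-- stated objective: alternative
-- what changed: Replaces the BFS with a frontier queue and visited set by a union-find (disjoint-set forest) over the four fixed nodes: every node pair is scanned once, components are merged, and connectivity is the set of roots having size 1.
-- outside the precondition, e.g. on is_weakly_connected([[0, 0, 0, 0], [0], [0], [0]]): A returns False, B raises IndexError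
import Mathlib
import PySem

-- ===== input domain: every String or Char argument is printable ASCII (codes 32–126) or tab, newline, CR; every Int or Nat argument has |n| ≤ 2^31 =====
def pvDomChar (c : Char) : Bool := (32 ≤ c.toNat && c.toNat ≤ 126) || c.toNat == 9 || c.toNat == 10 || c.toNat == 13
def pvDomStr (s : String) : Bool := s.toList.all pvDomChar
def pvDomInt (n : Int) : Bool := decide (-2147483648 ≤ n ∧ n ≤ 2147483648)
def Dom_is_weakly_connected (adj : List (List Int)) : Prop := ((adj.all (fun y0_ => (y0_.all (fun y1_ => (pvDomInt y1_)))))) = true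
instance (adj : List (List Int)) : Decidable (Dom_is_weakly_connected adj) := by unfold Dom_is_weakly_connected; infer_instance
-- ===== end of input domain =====

-- B replaces A's BFS (frontier queue + visited set) by a union-find over the four fixed
-- nodes scanning all node pairs; same weak-connectivity verdict, no speed claim.

-- ===== PORT A =====
-- nodes = list(range(4))
def pvNodes : List Int := [0, 1, 2, 3]

-- adj[u][v], total form: exact whenever rows 0..3 exist with length ≥ 4 (Pre_)
def pvEntryA (adj : List (List Int)) (u v : Int) : Int :=
  (PySem.List.pyGet? ((PySem.List.pyGet? adj u).getD []) v).getD 0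

-- the test 'adj[u][v] or adj[v][u]'
def pvEdgeA (adj : List (List Int)) (u v : Int) : Bool :=
  decide (pvEntryA adj u v ≠ 0) || decide (pvEntryA adj v u ≠ 0)

-- body of 'for v in nodes: …' for one popped u; state = (visited, rest of queue)
def pvBfsInner (E : Int → Int → Bool) (u : Int) (st : PySem.Set Int × List Int) :
    PySem.Set Int × List Int :=
  pvNodes.foldl (fun st v =>
    if E u v then
      if PySem.Set.contains st.1 v then st
      else (PySem.Set.add st.1 v, st.2 ++ [v])
    else st) st

-- 'while queue: u = queue.popleft(); …'; fuel 5 exceeds the ≤ 4 possible pops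
def pvBfsLoop (E : Int → Int → Bool) : Nat → PySem.Set Int → List Int → PySem.Set Int
  | 0, vis, _ => vis
  | _ + 1, vis, [] => vis
  | n + 1, vis, u :: rest =>
      let st := pvBfsInner E u (vis, rest)
      pvBfsLoop E n st.1 st.2

def is_weakly_connected (adj : List (List Int)) : Bool :=
  decide ((pvBfsLoop (pvEdgeA adj) 5 (PySem.Set.ofList [0]) [0]).length = pvNodes.length)

-- ===== PORT B =====
def pvEntryB (adj : List (List Int)) (u v : Int) : Int :=
  (PySem.List.pyGet? ((PySem.List.pyGet? adj u).getD []) v).getD 0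

def pvEdgeB (adj : List (List Int)) (i j : Int) : Bool :=
  decide (pvEntryB adj i j ≠ 0) || decide (pvEntryB adj j i ≠ 0)

-- 'while parent[x] != x: x = parent[x]'; fuel 4 exceeds the ≤ 3-link paths of the forest
def pvFind (parent : List Int) : Nat → Int → Int
  | 0, x => x
  | n + 1, x =>
      let p := (PySem.List.pyGet? parent x).getD x
      if p = x then x else pvFind parent n p

-- 'ri, rj = find(i), find(j); if ri != rj: parent[ri] = rj'
def pvUnionStep (parent : List Int) (i j : Int) : List Int :=
  let ri := pvFind parent 4 i
  let rj := pvFind parent 4 j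
  if ri ≠ rj then PySem.List.pySetD parent ri rj else parent

def pvUfLoop (E : Int → Int → Bool) (parent : List Int) : List Int :=
  pvNodes.foldl (fun parent i =>
    pvNodes.foldl (fun parent j =>
      if E i j then pvUnionStep parent i j else parent) parent) parent

def is_weakly_connected_alt (adj : List (List Int)) : Bool :=
  let parent := pvUfLoop (pvEdgeB adj) [0, 1, 2, 3]
  decide ((PySem.Set.ofList (pvNodes.map (fun i => pvFind parent 4 i))).length = 1)

-- ===== PRECONDITION & SPEC =====
-- Pre_ excludes ragged/short matrices: there A reads only the entries its BFS frontier
-- happens to reach, so whether it returns or raises IndexError is an accident of the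
-- traversal, while B reads all 16 entries; both are exact on matrices with ≥ 4 rows
-- whose first four rows have length ≥ 4.
def Pre_is_weakly_connected (adj : List (List Int)) : Prop :=
  4 ≤ adj.length ∧ ∀ row ∈ adj.take 4, 4 ≤ row.length
instance (adj : List (List Int)) : Decidable (Pre_is_weakly_connected adj) := by
  unfold Pre_is_weakly_connected; infer_instance

def pvWitness_is_weakly_connected : List (List Int) :=
  [[0, 1, 0, 0], [1, 0, 1, 0], [0, 1, 0, 1], [0, 0, 1, 0]]

def Spec_is_weakly_connected (adj : List (List Int)) (out : Bool) : Prop := out = is_weakly_connected_alt adj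
instance (adj : List (List Int)) (out : Bool) : Decidable (Spec_is_weakly_connected adj out) := by unfold Spec_is_weakly_connected; infer_instance

-- ===== CLAIM (what is proved, stated in full; the proofs are below) =====
def Claim_equal_is_weakly_connected : Prop := ∀ (adj : List (List Int)), Dom_is_weakly_connected adj → Pre_is_weakly_connected adj → Spec_is_weakly_connected adj (is_weakly_connected adj)

-- ===== LEMMAS AND PROOFS =====

-- a canonical edge function determined by the 10 relevant boolean edge tests
def mkE (b01 b02 b03 b12 b13 b23 d0 d1 d2 d3 : Bool) (i j : Int) : Bool :=
  if i == j then (if i == 0 then d0 else if i == 1 then d1 else if i == 2 then d2 else if i == 3 then d3 else false)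
  else if (i == 0 && j == 1) || (i == 1 && j == 0) then b01
  else if (i == 0 && j == 2) || (i == 2 && j == 0) then b02
  else if (i == 0 && j == 3) || (i == 3 && j == 0) then b03
  else if (i == 1 && j == 2) || (i == 2 && j == 1) then b12
  else if (i == 1 && j == 3) || (i == 3 && j == 1) then b13
  else if (i == 2 && j == 3) || (i == 3 && j == 2) then b23
  else false

lemma pvEdgeA_comm (adj : List (List Int)) (u v : Int) :
    pvEdgeA adj u v = pvEdgeA adj v u := Bool.or_comm _ _

lemma pvEdgeB_eq (adj : List (List Int)) (i j : Int) :
    pvEdgeB adj i j = pvEdgeA adj i j := rfl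

-- on nodes 0..3 the real edge test agrees with the canonical one built from its 10 values
lemma edge_mkE (adj : List (List Int)) : ∀ i j, i ∈ pvNodes → j ∈ pvNodes →
    pvEdgeA adj i j
      = mkE (pvEdgeA adj 0 1) (pvEdgeA adj 0 2) (pvEdgeA adj 0 3) (pvEdgeA adj 1 2)
            (pvEdgeA adj 1 3) (pvEdgeA adj 2 3) (pvEdgeA adj 0 0) (pvEdgeA adj 1 1)
            (pvEdgeA adj 2 2) (pvEdgeA adj 3 3) i j := by
  intro i j hi hj
  simp only [pvNodes, List.mem_cons, List.not_mem_nil, or_false] at hi hj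
  rcases hi with rfl | rfl | rfl | rfl <;> rcases hj with rfl | rfl | rfl | rfl <;>
    simp [mkE] <;> exact pvEdgeA_comm adj _ _

lemma bfsInner_congr (E F : Int → Int → Bool)
    (h : ∀ i j, i ∈ pvNodes → j ∈ pvNodes → E i j = F i j)
    (u : Int) (hu : u ∈ pvNodes) (st : PySem.Set Int × List Int) :
    pvBfsInner E u st = pvBfsInner F u st := by
  unfold pvBfsInner
  apply PySem.List.foldl_congr_mem
  intro acc x hx
  rw [h u x hu hx]

lemma bfsInner_aux (E : Int → Int → Bool) (u : Int) :
    ∀ (l : List Int) (st : PySem.Set Int × List Int),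
      (∀ v ∈ st.2, v ∈ pvNodes) → (∀ v ∈ l, v ∈ pvNodes) →
      ∀ v ∈ (l.foldl (fun st v =>
          if E u v then
            if PySem.Set.contains st.1 v then st
            else (PySem.Set.add st.1 v, st.2 ++ [v])
          else st) st).2, v ∈ pvNodes := by
  intro l
  induction l with
  | nil => intro st hst _; simpa using hst
  | cons x xs ih =>
      intro st hst hl
      simp only [List.foldl_cons]
      apply ih
      · split_ifs with h1 h2
        · exact hst
        · intro v hv
          rcases List.mem_append.1 hv with hv | hv
          · exact hst v hv
          · have hx : v = x := by simpa using hv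
            exact hx ▸ hl x (by simp)
        · exact hst
      · intro v hv; exact hl v (List.mem_cons_of_mem _ hv)

lemma bfsInner_queue (E : Int → Int → Bool) (u : Int) (st : PySem.Set Int × List Int)
    (hst : ∀ v ∈ st.2, v ∈ pvNodes) : ∀ v ∈ (pvBfsInner E u st).2, v ∈ pvNodes := by
  unfold pvBfsInner
  exact bfsInner_aux E u pvNodes st hst (fun v hv => hv)

lemma bfsLoop_congr (E F : Int → Int → Bool)
    (h : ∀ i j, i ∈ pvNodes → j ∈ pvNodes → E i j = F i j) :
    ∀ (fuel : Nat) (vis : PySem.Set Int) (queue : List Int),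
      (∀ u ∈ queue, u ∈ pvNodes) →
      pvBfsLoop E fuel vis queue = pvBfsLoop F fuel vis queue := by
  intro fuel
  induction fuel with
  | zero => intro vis queue _; rfl
  | succ n ih =>
      intro vis queue hq
      cases queue with
      | nil => rfl
      | cons u rest =>
          have hu : u ∈ pvNodes := hq u (by simp)
          have hrest : ∀ v ∈ rest, v ∈ pvNodes := fun v hv => hq v (by simp [hv])
          simp only [pvBfsLoop]
          rw [bfsInner_congr E F h u hu (vis, rest)]
          exact ih _ _ (bfsInner_queue F u (vis, rest) hrest)

lemma ufLoop_congr (E F : Int → Int → Bool)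
    (h : ∀ i j, i ∈ pvNodes → j ∈ pvNodes → E i j = F i j) (parent : List Int) :
    pvUfLoop E parent = pvUfLoop F parent := by
  unfold pvUfLoop
  apply PySem.List.foldl_congr_mem
  intro acc i hi
  apply PySem.List.foldl_congr_mem
  intro acc' j hj
  rw [h i j hi hj]

-- BFS and union-find agree for every canonical edge function (1024 closed cases)
set_option maxRecDepth 100000 in
set_option maxHeartbeats 4000000 in
lemma mkE_main : ∀ b01 b02 b03 b12 b13 b23 d0 d1 d2 d3 : Bool,
    decide ((pvBfsLoop (mkE b01 b02 b03 b12 b13 b23 d0 d1 d2 d3) 5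
              (PySem.Set.ofList [0]) [0]).length = pvNodes.length)
      = (let parent := pvUfLoop (mkE b01 b02 b03 b12 b13 b23 d0 d1 d2 d3) [0, 1, 2, 3]
         decide ((PySem.Set.ofList (pvNodes.map (fun i => pvFind parent 4 i))).length = 1)) := by
  decide

lemma ports_agree (adj : List (List Int)) :
    is_weakly_connected adj = is_weakly_connected_alt adj := by
  have h := edge_mkE adj
  unfold is_weakly_connected is_weakly_connected_alt
  rw [bfsLoop_congr _ _ h 5 (PySem.Set.ofList [0]) [0]
        (by intro u hu; simp only [List.mem_singleton] at hu; subst hu; simp [pvNodes])]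
  have hB : ∀ i j, i ∈ pvNodes → j ∈ pvNodes →
      pvEdgeB adj i j
        = mkE (pvEdgeA adj 0 1) (pvEdgeA adj 0 2) (pvEdgeA adj 0 3) (pvEdgeA adj 1 2)
              (pvEdgeA adj 1 3) (pvEdgeA adj 2 3) (pvEdgeA adj 0 0) (pvEdgeA adj 1 1)
              (pvEdgeA adj 2 2) (pvEdgeA adj 3 3) i j := by
    intro i j hi hj; rw [pvEdgeB_eq]; exact h i j hi hj
  rw [ufLoop_congr _ _ hB [0, 1, 2, 3]]
  exact mkE_main _ _ _ _ _ _ _ _ _ _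

-- ===== VERDICT (by name: the statement is the Claim_ definition above) =====
theorem is_weakly_connected_spec : Claim_equal_is_weakly_connected := by
  intro adj _ _
  unfold Spec_is_weakly_connected
  exact ports_agree adj
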